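-- pv_equiv track=rewrite | github.com/Duke-I3T-Lab/XR_Attention_Sudoku | gaze_data_analysis/offline/modules/computation.py | find_all_periods
-- ===== SOURCE A (Python) =====
-- def find_all_periods(signal, indices=[], data=None):
--     start = None
--     all_periods = []
--     for i in range(len(signal)-1):
--         if start is None:
--             if signal[i] and indices[i] + 1 == indices[i + 1]:
--                 start = i
--         else: # there is a start
--             if not signal[i] or indices[i] + 1 != indices[i + 1]:
--                 all_periods.append((start, i))
--                 start = None
--     if start is not None and indices[len(signal) - 1] - 1 == indices[len(signal)-2]:
--         all_periods.append((start, len(signal) - 1))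
--     return all_periods
-- ===== SOURCE B (Python) =====
-- def find_all_periods(values, indices=[], data=None):
--     # Phase 1: for each adjacent pair of positions, is the value on and the
--     # index step exactly 1?
--     active = [bool(values[i] and indices[i] + 1 == indices[i + 1])
--               for i in range(len(values) - 1)]
--     # Phase 2: group maximal runs of True; a run at positions s..e yields (s, e + 1).
--     periods = []
--     i = 0
--     while i < len(active):
--         if active[i]:
--             start = i
--             while i < len(active) and active[i]:
--                 i += 1
--             periods.append((start, i))
--         else:
--             i += 1
--     return periods
-- ===== Notes on version B (the rewrite author's own statement) =====
-- stated objective: alternative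
-- what changed: Replaces A's one-pass state-machine (a 'start' sentinel threaded through the loop plus a trailing consecutiveness guard) by a two-phase decomposition: first build the boolean activity table for adjacent positions, then group maximal runs of True; the trailing guard is dropped because it is provably always true when a run survives to the end. Pre_ excludes exactly the inputs where A raises IndexError (indices too short at an accessed position).
import Mathlib
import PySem

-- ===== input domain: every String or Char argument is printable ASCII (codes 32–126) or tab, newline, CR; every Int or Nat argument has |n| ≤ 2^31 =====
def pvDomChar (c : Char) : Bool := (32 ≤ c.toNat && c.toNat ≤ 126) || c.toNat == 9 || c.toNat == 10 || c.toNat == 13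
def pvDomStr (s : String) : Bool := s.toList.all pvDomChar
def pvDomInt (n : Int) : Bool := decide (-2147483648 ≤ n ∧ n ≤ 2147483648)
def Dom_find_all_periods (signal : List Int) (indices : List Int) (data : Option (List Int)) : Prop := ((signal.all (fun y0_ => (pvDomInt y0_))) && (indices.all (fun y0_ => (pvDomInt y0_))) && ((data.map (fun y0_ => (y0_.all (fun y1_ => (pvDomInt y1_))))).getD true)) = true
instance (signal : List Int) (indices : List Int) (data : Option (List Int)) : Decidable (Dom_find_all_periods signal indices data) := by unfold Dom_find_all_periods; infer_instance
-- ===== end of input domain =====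

-- B replaces A's one-pass start-sentinel state machine by a two-phase decomposition
-- (build the per-position activity table, then group maximal runs of True); same cost.

-- ===== PORT A =====
def find_all_periods (signal : List Int) (indices : List Int) (data : Option (List Int)) : List (Int × Int) :=
  -- literal transliteration of A: start = None; for i in range(len(signal)-1): …; trailing guarded append
  let n : Int := signal.length
  let r := (PySem.List.pyRange 0 (n - 1) 1).foldl
    (fun (st : Option Int × List (Int × Int)) (i : Int) =>
      match st with
      | (none, acc) =>
        if (PySem.List.pyGetD signal i 0 != 0)
            && (PySem.List.pyGetD indices i 0 + 1 == PySem.List.pyGetD indices (i + 1) 0)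
        then (some i, acc) else (none, acc)
      | (some s, acc) =>
        if (PySem.List.pyGetD signal i 0 == 0)
            || (PySem.List.pyGetD indices i 0 + 1 != PySem.List.pyGetD indices (i + 1) 0)
        then (none, acc ++ [(s, i)]) else (some s, acc))
    (none, [])
  match r with
  | (none, acc) => acc
  | (some s, acc) =>
    if PySem.List.pyGetD indices (n - 1) 0 - 1 == PySem.List.pyGetD indices (n - 2) 0
    then acc ++ [(s, n - 1)] else acc

-- ===== PORT B =====
-- B-side helpers: the activity test, and the run-grouping scan of Source B's while loops
def pvActive (signal : List Int) (indices : List Int) (i : Int) : Bool :=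
  (PySem.List.pyGetD signal i 0 != 0)
    && (PySem.List.pyGetD indices i 0 + 1 == PySem.List.pyGetD indices (i + 1) 0)

-- inner while loop: consume the leading run of True, return the position just past it
def pvSkipRun : List Bool → Int → Int × List Bool
  | true :: rest, i => pvSkipRun rest (i + 1)
  | l, i => (i, l)

theorem pvSkipRun_length_le : ∀ (l : List Bool) (i : Int), (pvSkipRun l i).2.length ≤ l.length := by
  intro l
  induction l with
  | nil => intro i; simp [pvSkipRun]
  | cons b rest ih =>
    intro i
    cases b
    · simp [pvSkipRun]
    · simpa [pvSkipRun] using Nat.le_succ_of_le (ih (i + 1))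

-- outer while loop: emit (start of run, position just past the run)
def pvGroup : List Bool → Int → List (Int × Int)
  | [], _ => []
  | false :: rest, i => pvGroup rest (i + 1)
  | true :: rest, i =>
      let p := pvSkipRun rest (i + 1)
      (i, p.1) :: pvGroup p.2 p.1
termination_by bs _ => bs.length
decreasing_by
  all_goals first
    | exact Nat.lt_succ_of_le (pvSkipRun_length_le rest (i + 1))
    | simp

def find_all_periods_alt (signal : List Int) (indices : List Int) (data : Option (List Int)) : List (Int × Int) :=
  let active := (PySem.List.pyRange 0 ((signal.length : Int) - 1) 1).map (pvActive signal indices)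
  pvGroup active 0

-- ===== PRECONDITION & SPEC =====
-- Pre_ = exactly the inputs on which the Python A returns normally: whenever the loop's
-- short-circuit reaches indices[i] and indices[i+1] (signal[i] truthy, i < len(signal)-1),
-- those positions exist in indices; B raises on exactly the same inputs.
def Pre_find_all_periods (signal : List Int) (indices : List Int) (data : Option (List Int)) : Prop :=
  ∀ i < signal.length - 1, signal.getD i 0 ≠ 0 → i + 1 < indices.length
instance (signal : List Int) (indices : List Int) (data : Option (List Int)) : Decidable (Pre_find_all_periods signal indices data) := by unfold Pre_find_all_periods; infer_instance
def pvWitness_find_all_periods : List Int × List Int × Option (List Int) := ([1, 1, 0], [5, 6, 9], none)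

def Spec_find_all_periods (signal : List Int) (indices : List Int) (data : Option (List Int)) (out : List (Int × Int)) : Prop := out = find_all_periods_alt signal indices data
instance (signal : List Int) (indices : List Int) (data : Option (List Int)) (out : List (Int × Int)) : Decidable (Spec_find_all_periods signal indices data out) := by unfold Spec_find_all_periods; infer_instance

-- ===== CLAIM (what is proved, stated in full; the proofs are below) =====
def Claim_equal_find_all_periods : Prop := ∀ (signal : List Int) (indices : List Int) (data : Option (List Int)), Dom_find_all_periods signal indices data → Pre_find_all_periods signal indices data → Spec_find_all_periods signal indices data (find_all_periods signal indices data)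

-- ===== LEMMAS AND PROOFS =====

-- A's loop body, named so the fold can be reasoned about
def pvStep (signal : List Int) (indices : List Int)
    (st : Option Int × List (Int × Int)) (i : Int) : Option Int × List (Int × Int) :=
  match st with
  | (none, acc) =>
    if (PySem.List.pyGetD signal i 0 != 0)
        && (PySem.List.pyGetD indices i 0 + 1 == PySem.List.pyGetD indices (i + 1) 0)
    then (some i, acc) else (none, acc)
  | (some s, acc) =>
    if (PySem.List.pyGetD signal i 0 == 0)
        || (PySem.List.pyGetD indices i 0 + 1 != PySem.List.pyGetD indices (i + 1) 0)
    then (none, acc ++ [(s, i)]) else (some s, acc)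

-- A's loop replayed over the boolean table with a position counter
def pvLoopA : List Bool → Int → Option Int × List (Int × Int) → Option Int × List (Int × Int)
  | [], _, st => st
  | b :: rest, i, (none, acc) => pvLoopA rest (i + 1) (if b then (some i, acc) else (none, acc))
  | b :: rest, i, (some s, acc) => pvLoopA rest (i + 1) (if b then (some s, acc) else (none, acc ++ [(s, i)]))

-- A's epilogue, with the (always true) guard already discharged
def pvFinish (iEnd : Int) : Option Int × List (Int × Int) → List (Int × Int)
  | (none, acc) => acc
  | (some s, acc) => acc ++ [(s, iEnd)]

theorem pvStep_eq (signal indices : List Int) (st : Option Int × List (Int × Int)) (i : Int) :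
    pvStep signal indices st i =
      (match st with
        | (none, acc) => if pvActive signal indices i then (some i, acc) else (none, acc)
        | (some s, acc) => if pvActive signal indices i then (some s, acc) else (none, acc ++ [(s, i)])) := by
  rcases st with ⟨opt, acc⟩
  cases opt with
  | none => rfl
  | some s =>
    simp only [pvStep, pvActive]
    by_cases h1 : PySem.List.pyGetD signal i 0 = 0 <;>
      by_cases h2 : PySem.List.pyGetD indices i 0 + 1 = PySem.List.pyGetD indices (i + 1) 0 <;>
        simp [h1, h2]

theorem foldl_eq_loopA (signal indices : List Int) :
    ∀ (k : Nat) (a b : Int), (b - a).toNat = k → ∀ st,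
      (PySem.List.pyRange a b 1).foldl (pvStep signal indices) st =
        pvLoopA ((PySem.List.pyRange a b 1).map (pvActive signal indices)) a st := by
  intro k
  induction k with
  | zero =>
    intro a b hab st
    rw [PySem.List.pyRange_one_eq_nil (by omega)]
    rfl
  | succ k ih =>
    intro a b hab st
    rw [PySem.List.pyRange_one_cons (by omega)]
    simp only [List.foldl_cons, List.map_cons]
    rw [ih (a + 1) b (by omega)]
    rw [pvStep_eq]
    rcases st with ⟨opt, acc⟩
    cases opt <;> cases h : pvActive signal indices a <;> simp [pvLoopA]

theorem loopA_group : ∀ (bs : List Bool),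
    (∀ (i : Int) (acc : List (Int × Int)),
        pvFinish (i + bs.length) (pvLoopA bs i (none, acc)) = acc ++ pvGroup bs i) ∧
    (∀ (i s : Int) (acc : List (Int × Int)),
        pvFinish (i + bs.length) (pvLoopA bs i (some s, acc)) =
          acc ++ (s, (pvSkipRun bs i).1) :: pvGroup (pvSkipRun bs i).2 (pvSkipRun bs i).1) := by
  intro bs
  induction bs with
  | nil =>
    constructor
    · intro i acc; simp [pvLoopA, pvFinish, pvGroup]
    · intro i s acc; simp [pvLoopA, pvFinish, pvGroup, pvSkipRun]
  | cons b rest ih =>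
    have hlen : ∀ i : Int, i + ((rest.length + 1 : Nat) : Int) = (i + 1) + (rest.length : Int) := by
      intro i; push_cast; ring
    constructor
    · intro i acc
      cases b with
      | false =>
        simp only [pvLoopA, pvGroup, List.length_cons, Bool.false_eq_true, ite_false]
        rw [hlen i]
        exact ih.1 (i + 1) acc
      | true =>
        simp only [pvLoopA, pvGroup, List.length_cons, ite_true]
        rw [hlen i]
        exact ih.2 (i + 1) i acc
    · intro i s acc
      cases b with
      | true =>
        simp only [pvLoopA, List.length_cons, ite_true]
        rw [hlen i]
        have h2 := ih.2 (i + 1) s acc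
        simpa [pvSkipRun] using h2
      | false =>
        simp only [pvLoopA, List.length_cons, Bool.false_eq_true, ite_false]
        rw [hlen i]
        have h1 := ih.1 (i + 1) (acc ++ [(s, i)])
        simpa [pvSkipRun, pvGroup] using h1

theorem loopA_some_last : ∀ (bs : List Bool) (i s : Int) (st : Option Int × List (Int × Int)),
    (pvLoopA bs i st).1 = some s → bs ≠ [] → bs.getLast? = some true := by
  intro bs
  induction bs with
  | nil => intro i s st _ hne; exact absurd rfl hne
  | cons b rest ih =>
    intro i s st hsome _
    cases rest with
    | nil =>
      rcases st with ⟨opt, acc⟩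
      cases opt <;> cases b <;> simp_all [pvLoopA]
    | cons c rest2 =>
      have : (b :: c :: rest2).getLast? = (c :: rest2).getLast? := by
        simp [List.getLast?_cons_cons]
      rw [this]
      rcases st with ⟨opt, acc⟩
      cases opt <;> exact ih (i + 1) s _ hsome (by simp)

-- ===== VERDICT (by name: the statement is the Claim_ definition above) =====
theorem find_all_periods_spec : Claim_equal_find_all_periods := by
  intro signal indices data _ _
  unfold Spec_find_all_periods find_all_periods_alt
  show (match (PySem.List.pyRange 0 ((signal.length : Int) - 1) 1).foldl
          (pvStep signal indices) (none, []) with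
        | (none, acc) => acc
        | (some s, acc) =>
          if PySem.List.pyGetD indices ((signal.length : Int) - 1) 0 - 1
              == PySem.List.pyGetD indices ((signal.length : Int) - 2) 0
          then acc ++ [(s, (signal.length : Int) - 1)] else acc)
      = pvGroup ((PySem.List.pyRange 0 ((signal.length : Int) - 1) 1).map (pvActive signal indices)) 0
  set N : Int := (signal.length : Int) with hN
  rw [foldl_eq_loopA signal indices ((N - 1) - 0).toNat 0 (N - 1) rfl (none, [])]
  set bs : List Bool := (PySem.List.pyRange 0 (N - 1) 1).map (pvActive signal indices) with hbs
  have hgrp := (loopA_group bs).1 0 []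
  rcases hr : pvLoopA bs 0 (none, []) with ⟨opt, acc⟩
  rw [hr] at hgrp
  cases opt with
  | none => simpa [pvFinish] using hgrp
  | some s =>
    -- bs is nonempty, its last flag is true, hence the trailing guard of A holds
    have hne : bs ≠ [] := by
      intro h; rw [h] at hr; simp [pvLoopA] at hr
    have hlast : bs.getLast? = some true :=
      loopA_some_last bs 0 s (none, []) (by rw [hr]) hne
    have hNpos : 0 < N - 1 := by
      by_contra h
      exact hne (by rw [hbs, PySem.List.pyRange_one_eq_nil (by omega)]; rfl)
    have hact : pvActive signal indices (N - 2) = true := by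
      have hsplit : PySem.List.pyRange 0 (N - 1) 1
          = PySem.List.pyRange 0 (N - 2) 1 ++ [N - 2] := by
        have h1 : N - 1 = (N - 2) + 1 := by ring
        rw [h1, PySem.List.pyRange_one_succ_right (by omega : (0:Int) ≤ N - 2)]
      have : bs.getLast? = some (pvActive signal indices (N - 2)) := by
        rw [hbs, hsplit]
        simp
      rw [this] at hlast
      exact Option.some.injEq _ _ ▸ hlast
    have hguard : (PySem.List.pyGetD indices (N - 1) 0 - 1
        == PySem.List.pyGetD indices (N - 2) 0) = true := by
      have h2 : PySem.List.pyGetD indices (N - 2) 0 + 1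
          = PySem.List.pyGetD indices ((N - 2) + 1) 0 := by
        simp only [pvActive, Bool.and_eq_true, beq_iff_eq] at hact
        exact hact.2
      have h3 : (N - 2) + 1 = N - 1 := by ring
      rw [h3] at h2
      simp only [beq_iff_eq]
      omega
    have hlenbs : (bs.length : Int) = N - 1 := by
      rw [hbs]
      simp [PySem.List.length_pyRange_one]
      omega
    simp only [hguard, ite_true]
    simp only [List.nil_append] at hgrp
    rw [← hgrp]
    simp [pvFinish, hlenbs]
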